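-- pv_equiv track=rewrite | github.com/INDIE-RO/INDIE-RO | Data/Proprecess.py | generate_age_sequence
-- ===== SOURCE A (Python) =====
-- def generate_age_sequence(start_age, end_age):
--     categories = [
--         (0, 19, '1'),
--         (20, 24, '2'),
--         (25, 29, '3'),
--         (30, 34, '4'),
--         (35, float('inf'), '5')  # float('inf')를 사용하여 35세 이상을 처리
--     ]
--
--     result = ""
--     for min_age, max_age, number in categories:
--         if start_age <= max_age and end_age >= min_age:
--             result += number
--
--     return result
-- ===== SOURCE B (Python) =====
-- def generate_age_sequence(start_age, end_age):
--     # index of the first category whose upper bound >= start_age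
--     low = 0 if start_age <= 19 else 1 if start_age <= 24 else 2 if start_age <= 29 else 3 if start_age <= 34 else 4
--     # index of the last category whose lower bound <= end_age (-1 if none; the slice is then empty)
--     high = -1 if end_age < 0 else 0 if end_age < 20 else 1 if end_age < 25 else 2 if end_age < 30 else 3 if end_age < 35 else 4
--     return "12345"[low:high + 1]
-- ===== Notes on version B (the rewrite author's own statement) =====
-- stated objective: alternative
-- what changed: Instead of testing each of the five categories in a loop and concatenating, B maps start_age and end_age to a low/high category index in closed form and returns one slice of the constant string '12345'.
import Mathlib
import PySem

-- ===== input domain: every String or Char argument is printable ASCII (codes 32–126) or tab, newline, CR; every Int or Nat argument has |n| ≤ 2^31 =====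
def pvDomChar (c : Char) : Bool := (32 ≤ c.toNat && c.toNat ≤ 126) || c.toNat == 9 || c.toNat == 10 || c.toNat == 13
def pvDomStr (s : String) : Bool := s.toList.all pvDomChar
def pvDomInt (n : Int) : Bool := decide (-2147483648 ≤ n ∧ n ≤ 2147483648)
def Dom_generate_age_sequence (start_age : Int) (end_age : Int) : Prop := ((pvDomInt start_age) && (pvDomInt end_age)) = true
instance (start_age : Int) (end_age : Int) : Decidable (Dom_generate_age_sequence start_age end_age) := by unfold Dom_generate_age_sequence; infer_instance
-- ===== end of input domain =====

-- B replaces A's per-category scan with a closed-form low/high index and one slice of "12345" (alternative decomposition, same cost).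

-- ===== PORT A =====
-- the max bound is Option Int: none models float('inf') (start_age <= inf is always true)
def agCategories : List (Int × Option Int × String) :=
  [(0, some 19, "1"), (20, some 24, "2"), (25, some 29, "3"), (30, some 34, "4"), (35, none, "5")]

def generate_age_sequence (start_age : Int) (end_age : Int) : String :=
  agCategories.foldl
    (fun result c =>
      if (c.2.1.all fun mx => decide (start_age ≤ mx)) && decide (end_age ≥ c.1) then
        result ++ c.2.2
      else result)
    ""

-- ===== PORT B =====
def generate_age_sequence_alt (start_age : Int) (end_age : Int) : String :=
  let low : Int :=
    if start_age ≤ 19 then 0 else if start_age ≤ 24 then 1 else if start_age ≤ 29 then 2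
    else if start_age ≤ 34 then 3 else 4
  let high : Int :=
    if end_age < 0 then -1 else if end_age < 20 then 0 else if end_age < 25 then 1
    else if end_age < 30 then 2 else if end_age < 35 then 3 else 4
  PySem.Str.slice "12345" (some low) (some (high + 1))

-- ===== PRECONDITION & SPEC =====
def Spec_generate_age_sequence (start_age : Int) (end_age : Int) (out : String) : Prop := out = generate_age_sequence_alt start_age end_age
instance (start_age : Int) (end_age : Int) (out : String) : Decidable (Spec_generate_age_sequence start_age end_age out) := by unfold Spec_generate_age_sequence; infer_instance

-- ===== CLAIM (what is proved, stated in full; the proofs are below) =====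
def Claim_equal_generate_age_sequence : Prop := ∀ (start_age : Int) (end_age : Int), Dom_generate_age_sequence start_age end_age → Spec_generate_age_sequence start_age end_age (generate_age_sequence start_age end_age)

-- ===== LEMMAS AND PROOFS =====

-- ===== VERDICT (by name: the statement is the Claim_ definition above) =====
set_option maxHeartbeats 4000000 in
theorem generate_age_sequence_spec : Claim_equal_generate_age_sequence := by
  intro s e _
  unfold Spec_generate_age_sequence generate_age_sequence generate_age_sequence_alt agCategories
  simp only [List.foldl, Option.all_some, Option.all_none, Bool.true_and, Bool.and_eq_true,
    decide_eq_true_eq, ge_iff_le]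
  split_ifs <;> first | omega | rfl
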